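-- pv_equiv track=rewrite | github.com/thepian/pypy | pypy/rlib/rstring.py | rsplit
-- ===== SOURCE A (Python) =====
-- def rsplit(value, by, maxsplit=-1):
--     res = []
--     end = len(value)
--     bylen = len(by)
--     if bylen == 0:
--         raise ValueError("empty separator")
--
--     while maxsplit != 0:
--         next = value.rfind(by, 0, end)
--         if next < 0:
--             break
--         res.append(value[next+bylen:end])
--         end = next
--         maxsplit -= 1   # NB. if it's already < 0, it stays < 0
--
--     res.append(value[:end])
--     res.reverse()
--     return res
-- ===== SOURCE B (Python) =====
-- def rsplit(value, by, maxsplit=-1):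
--     if len(by) == 0:
--         raise ValueError("empty separator")
--     # work on the reversed string with a forward-moving cursor
--     rv = value[::-1]
--     rb = by[::-1]
--     parts = []
--     start = 0
--     while maxsplit != 0:
--         i = rv.find(rb, start)
--         if i < 0:
--             break
--         parts.append(rv[start:i])
--         start = i + len(rb)
--         maxsplit -= 1
--     parts.append(rv[start:])
--     return [p[::-1] for p in reversed(parts)]
-- ===== Notes on version B (the rewrite author's own statement) =====
-- stated objective: alternative
-- what changed: B replaces A's backward scan (rfind with a shrinking end bound) by reversing the string and the separator once and running a forward find cursor over the reversed string, then reversing the collected pieces back; A raises ValueError on an empty separator, which Pre_ excludes (B raises there too).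
import Mathlib
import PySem

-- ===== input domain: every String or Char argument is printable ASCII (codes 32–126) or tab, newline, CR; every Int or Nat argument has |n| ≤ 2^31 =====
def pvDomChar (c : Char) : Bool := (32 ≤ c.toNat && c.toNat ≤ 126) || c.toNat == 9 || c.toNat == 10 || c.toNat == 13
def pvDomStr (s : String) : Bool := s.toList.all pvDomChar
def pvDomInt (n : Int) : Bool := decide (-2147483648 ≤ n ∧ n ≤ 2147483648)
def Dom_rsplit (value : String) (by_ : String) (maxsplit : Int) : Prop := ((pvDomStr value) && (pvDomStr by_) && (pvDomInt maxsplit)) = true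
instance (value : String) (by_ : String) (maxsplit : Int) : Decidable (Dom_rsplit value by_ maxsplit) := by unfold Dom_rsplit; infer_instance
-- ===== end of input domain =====

-- B reverses string and separator and splits forward instead of scanning backward with rfind;
-- an equally-costly alternative decomposition. A raises ValueError on by == '' (excluded by Pre_; B raises there too).

-- ===== PORT A =====

-- termination facts for the ports' loops (cited in decreasing_by; proofs below would be circular, so they live here)
theorem pvRfindGoSpec (s sub : List Char) (j : Nat) :
    (PySem.Chars.rfind.go s sub j = -1 ∧ ∀ i, i ≤ j → ¬ sub <+: s.drop i) ∨
    (∃ i : Nat, i ≤ j ∧ PySem.Chars.rfind.go s sub j = (i : Int) ∧ sub <+: s.drop i ∧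
      ∀ k, i < k → k ≤ j → ¬ sub <+: s.drop k) := by
  induction j with
  | zero =>
    by_cases h : sub.isPrefixOf s
    · right
      exact ⟨0, le_refl 0, by simp [PySem.Chars.rfind.go, h],
        by simpa [List.isPrefixOf_iff_prefix] using h, by omega⟩
    · left
      refine ⟨by simp [PySem.Chars.rfind.go, h], ?_⟩
      intro i hi
      interval_cases i
      simpa [List.isPrefixOf_iff_prefix] using h
  | succ j ih =>
    by_cases h : sub.isPrefixOf (s.drop (j + 1))
    · right
      exact ⟨j + 1, le_refl _, by simp [PySem.Chars.rfind.go, h],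
        by simpa [List.isPrefixOf_iff_prefix] using h, by omega⟩
    · have hnp : ¬ sub <+: s.drop (j + 1) := by
        simpa [List.isPrefixOf_iff_prefix] using h
      rcases ih with ⟨h1, h2⟩ | ⟨i, hij, hval, hocc, hmax⟩
      · left
        refine ⟨by simp [PySem.Chars.rfind.go, h, h1], ?_⟩
        intro i hi
        rcases Nat.lt_or_ge i (j + 1) with hlt | hge
        · exact h2 i (by omega)
        · have : i = j + 1 := by omega
          subst this; exact hnp
      · right
        refine ⟨i, by omega, by simp [PySem.Chars.rfind.go, h, hval], hocc, ?_⟩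
        intro k hk hk2
        rcases Nat.lt_or_ge k (j + 1) with hlt | hge
        · exact hmax k hk (by omega)
        · have : k = j + 1 := by omega
          subst this; exact hnp

theorem pvRfindFrom_eq_rfind (v b : List Char) (e : Nat) :
    PySem.Chars.rfindFrom v b 0 (some (e : Int)) = PySem.Chars.rfind (v.take e) b := by
  unfold PySem.Chars.rfindFrom
  by_cases h : (v.length : Int) < (e : Int)
  · have he : List.take e v = v := List.take_of_length_le (by exact_mod_cast h.le)
    simp [h, he, PySem.Chars.rfind]
    split <;> omega
  · simp [h, PySem.Chars.rfind, Int.not_lt.mpr (Int.natCast_nonneg e)]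
    intro h'
    omega

theorem pvExistsDrop (sub s : List Char) : (∃ j, sub <+: s.drop j) ↔ sub <:+: s := by
  rw [PySem.Chars.exists_prefix_drop_iff_isIn, PySem.Chars.isIn_iff_infix]

theorem pvPrefixTakeDrop (v b : List Char) (hb : b ≠ []) (e i : Nat) :
    b <+: (v.take e).drop i ↔ (b <+: v.drop i ∧ i + b.length ≤ e) := by
  have hL : 0 < b.length := List.length_pos_of_ne_nil hb
  rw [List.drop_take, List.prefix_take_iff]
  constructor
  · rintro ⟨h1, h2⟩; exact ⟨h1, by omega⟩
  · rintro ⟨h1, h2⟩; exact ⟨h1, by omega⟩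

theorem pvOccLt (v b : List Char) (hb : b ≠ []) (i : Nat) (h : b <+: v.drop i) :
    i + b.length ≤ v.length := by
  have hL : 0 < b.length := List.length_pos_of_ne_nil hb
  have := h.length_le
  simp [List.length_drop] at this
  omega

theorem pvRfindFromNat (v b : List Char) (hb : b ≠ []) (e : Nat) :
    (PySem.Chars.rfindFrom v b 0 (some (e : Int)) = -1 ∧
      ∀ i, i + b.length ≤ e → ¬ b <+: v.drop i) ∨
    (∃ i : Nat, PySem.Chars.rfindFrom v b 0 (some (e : Int)) = (i : Int) ∧
      i + b.length ≤ e ∧ b <+: v.drop i ∧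
      ∀ k, i < k → k + b.length ≤ e → ¬ b <+: v.drop k) := by
  have hL : 0 < b.length := List.length_pos_of_ne_nil hb
  rw [pvRfindFrom_eq_rfind, PySem.Chars.rfind]
  rcases pvRfindGoSpec (v.take e) b ((v.take e).length) with ⟨h1, h2⟩ | ⟨i, hij, hval, hocc, hmax⟩
  · left
    refine ⟨h1, ?_⟩
    intro i hi hocc
    have hocc' : b <+: (v.take e).drop i := (pvPrefixTakeDrop v b hb e i).mpr ⟨hocc, hi⟩
    have hlt : i + b.length ≤ (v.take e).length := pvOccLt _ b hb i hocc'
    exact h2 i (by omega) hocc'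
  · right
    obtain ⟨hocc1, hocc2⟩ := (pvPrefixTakeDrop v b hb e i).mp hocc
    refine ⟨i, hval, hocc2, hocc1, ?_⟩
    intro k hk hk2 hkocc
    have hocc' : b <+: (v.take e).drop k := (pvPrefixTakeDrop v b hb e k).mpr ⟨hkocc, hk2⟩
    have hlt : k + b.length ≤ (v.take e).length := pvOccLt _ b hb k hocc'
    exact hmax k hk (by omega) hocc'

theorem pvFindFromNat (rv rb : List Char) (hrb : rb ≠ []) (k : Nat) :
    (PySem.Chars.findFrom rv rb (k : Int) none = -1 ∧
      ∀ j, k ≤ j → ¬ rb <+: rv.drop j) ∨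
    (∃ j : Nat, PySem.Chars.findFrom rv rb (k : Int) none = (j : Int) ∧
      k ≤ j ∧ rb <+: rv.drop j ∧ ∀ l, k ≤ l → l < j → ¬ rb <+: rv.drop l) := by
  have hL : 0 < rb.length := List.length_pos_of_ne_nil hrb
  unfold PySem.Chars.findFrom
  by_cases h : (rv.length : Int) < (k : Int)
  · left
    constructor
    · simp [h, Int.not_lt.mpr (Int.natCast_nonneg k)]
    · intro j hj hocc
      have := pvOccLt rv rb hrb j hocc
      omega
  · have hkn : k ≤ rv.length := by exact_mod_cast Int.not_lt.mp h
    have hred : (if (rv.length : Int) < (k : Int) then (rv.length : Int) else (k : Int)) = (k : Int) := by simp [h]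
    by_cases hr : PySem.Chars.find (rv.drop k) rb = -1
    · left
      constructor
      · simp [h, Int.not_lt.mpr (Int.natCast_nonneg k)]
        intro h'
        exact absurd hr h'
      · intro j hj hocc
        have hinf : rb <:+: rv.drop k := by
          rw [← pvExistsDrop]
          exact ⟨j - k, by rw [List.drop_drop, (by omega : k + (j - k) = j)]; exact hocc⟩
        exact (PySem.Chars.find_eq_neg_one_iff _ _).mp hr hinf
    · right
      have h0 : 0 ≤ PySem.Chars.find (rv.drop k) rb := by
        have := PySem.Chars.neg_one_le_find (rv.drop k) rb
        omega
      obtain ⟨hpre, hmin⟩ := PySem.Chars.find_spec h0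
      set r := PySem.Chars.find (rv.drop k) rb with hrdef
      refine ⟨k + r.toNat, ?_, by omega, ?_, ?_⟩
      · simp [h, Int.not_lt.mpr (Int.natCast_nonneg k)]
        omega
      · have h2 := hpre
        rw [List.drop_drop] at h2
        exact h2
      · intro l hl1 hl2 hocc
        have : rb <+: (rv.drop k).drop (l - k) := by
          rw [List.drop_drop, (by omega : k + (l - k) = l)]
          exact hocc
        exact hmin (l - k) (by omega) this

theorem pvRfindFrom_toNat_lt (v b : List Char) (hb : b ≠ []) (e : Nat)
    (h : ¬ PySem.Chars.rfindFrom v b 0 (some (e : Int)) < 0) :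
    (PySem.Chars.rfindFrom v b 0 (some (e : Int))).toNat < e := by
  rcases pvRfindFromNat v b hb e with ⟨h1, _⟩ | ⟨i, hval, hle, _, _⟩
  · omega
  · rw [hval]
    have : 0 < b.length := List.length_pos_of_ne_nil hb
    simp; omega

-- A's loop: while maxsplit != 0: next = value.rfind(by, 0, end); if next < 0: break;
--           res.append(value[next+bylen:end]); end = next; maxsplit -= 1
def rsplitLoopA (v b : List Char) (hb : b ≠ []) (res : List (List Char)) (e : Nat) (m : Int) :
    List (List Char) × Nat :=
  if m = 0 then (res, e)
  else
    let next := PySem.Chars.rfindFrom v b 0 (some (e : Int))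
    if h : next < 0 then (res, e)
    else rsplitLoopA v b hb
      (res ++ [PySem.Chars.slice v (some (next + (b.length : Int))) (some (e : Int))])
      next.toNat (m - 1)
  termination_by e
  decreasing_by exact pvRfindFrom_toNat_lt v b hb e h

def rsplit (value : String) (by_ : String) (maxsplit : Int) : List String :=
  let v := value.toList
  let b := by_.toList
  if hb : b.length = 0 then []  -- Python: raise ValueError("empty separator"); excluded by Pre_
  else
    let r := rsplitLoopA v b (fun hn => hb (by simp [hn])) [] v.length maxsplit
    ((r.1 ++ [PySem.Chars.slice v none (some (r.2 : Int))]).reverse).map String.ofList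

-- ===== PORT B =====

theorem pvFindFrom_bounds (rv rb : List Char) (hrb : rb ≠ []) (k : Nat)
    (h : ¬ PySem.Chars.findFrom rv rb (k : Int) none < 0) :
    k ≤ (PySem.Chars.findFrom rv rb (k : Int) none).toNat ∧
      (PySem.Chars.findFrom rv rb (k : Int) none).toNat + rb.length ≤ rv.length := by
  rcases pvFindFromNat rv rb hrb k with ⟨h1, _⟩ | ⟨j, hval, hkj, hocc, _⟩
  · omega
  · rw [hval]
    have hL : 0 < rb.length := List.length_pos_of_ne_nil hrb
    have := hocc.length_le
    simp [List.length_drop] at this ⊢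
    omega

-- B's loop: while maxsplit != 0: i = rv.find(rb, start); if i < 0: break;
--           parts.append(rv[start:i]); start = i + len(rb); maxsplit -= 1
def rsplitLoopB (rv rb : List Char) (hrb : rb ≠ []) (parts : List (List Char)) (start : Nat)
    (m : Int) : List (List Char) × Nat :=
  if m = 0 then (parts, start)
  else
    let i := PySem.Chars.findFrom rv rb (start : Int) none
    if h : i < 0 then (parts, start)
    else rsplitLoopB rv rb hrb
      (parts ++ [PySem.Chars.slice rv (some (start : Int)) (some i)])
      (i.toNat + rb.length) (m - 1)
  termination_by rv.length - start
  decreasing_by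
    have := pvFindFrom_bounds rv rb hrb start h
    have : 0 < rb.length := List.length_pos_of_ne_nil hrb
    omega

def rsplit_alt (value : String) (by_ : String) (maxsplit : Int) : List String :=
  let b := by_.toList
  if hb : b.length = 0 then []  -- Python: raise ValueError("empty separator"); excluded by Pre_
  else
    let rv := value.toList.reverse  -- value[::-1]  (PySem.List.slice?_none_none_neg_one)
    let rb := b.reverse             -- by[::-1]
    let r := rsplitLoopB rv rb (fun hn => hb (by simp [List.reverse_eq_nil_iff.mp hn])) [] 0 maxsplit
    ((r.1 ++ [PySem.Chars.slice rv (some (r.2 : Int)) none]).reverse).map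
      (fun p => String.ofList p.reverse)  -- [p[::-1] for p in reversed(parts)]

-- ===== PRECONDITION & SPEC =====
-- Pre_ excludes exactly the empty separator, on which A raises ValueError("empty separator").
def Pre_rsplit (value : String) (by_ : String) (maxsplit : Int) : Prop := by_ ≠ ""
instance (value : String) (by_ : String) (maxsplit : Int) : Decidable (Pre_rsplit value by_ maxsplit) := by unfold Pre_rsplit; infer_instance

def pvWitness_rsplit : String × String × Int := ("a b c", " ", -1)

def Spec_rsplit (value : String) (by_ : String) (maxsplit : Int) (out : List String) : Prop := out = rsplit_alt value by_ maxsplit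
instance (value : String) (by_ : String) (maxsplit : Int) (out : List String) : Decidable (Spec_rsplit value by_ maxsplit out) := by unfold Spec_rsplit; infer_instance

-- ===== CLAIM (what is proved, stated in full; the proofs are below) =====
def Claim_equal_rsplit : Prop := ∀ (value : String) (by_ : String) (maxsplit : Int), Dom_rsplit value by_ maxsplit → Pre_rsplit value by_ maxsplit → Spec_rsplit value by_ maxsplit (rsplit value by_ maxsplit)

-- ===== LEMMAS AND PROOFS =====

-- an occurrence of b at i in v is an occurrence of b.reverse at v.length - (i + b.length) in v.reverse
theorem pvOccRev (v b : List Char) (i : Nat) (h : i + b.length ≤ v.length) :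
    (b <+: v.drop i) ↔ (b.reverse <+: v.reverse.drop (v.length - (i + b.length))) := by
  rw [List.drop_reverse, (by omega : v.length - (v.length - (i + b.length)) = i + b.length),
    List.reverse_prefix, List.suffix_iff_eq_drop, List.prefix_iff_eq_take]
  rw [(by simp; omega : (v.take (i + b.length)).length = i + b.length)]
  rw [(by omega : i + b.length - b.length = i), List.drop_take,
    (by omega : i + b.length - i = b.length)]

-- the two searches find the SAME occurrence (A's rightmost ↔ B's leftmost in the reversed string)
theorem pvBridge (v b : List Char) (hb : b ≠ []) (e : Nat) (he : e ≤ v.length) :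
    (PySem.Chars.rfindFrom v b 0 (some (e : Int)) = -1 ∧
      PySem.Chars.findFrom v.reverse b.reverse ((v.length - e : Nat) : Int) none = -1) ∨
    (∃ i : Nat, i + b.length ≤ e ∧ b <+: v.drop i ∧
      PySem.Chars.rfindFrom v b 0 (some (e : Int)) = (i : Int) ∧
      PySem.Chars.findFrom v.reverse b.reverse ((v.length - e : Nat) : Int) none
        = ((v.length - (i + b.length) : Nat) : Int)) := by
  have hL : 0 < b.length := List.length_pos_of_ne_nil hb
  have hrb : b.reverse ≠ [] := fun hn => hb (by simpa using congrArg List.reverse hn)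
  have hn : v.reverse.length = v.length := List.length_reverse
  rcases pvRfindFromNat v b hb e with ⟨h1, h2⟩ | ⟨i, hval, hle, hocc, hmax⟩
  · left
    refine ⟨h1, ?_⟩
    rcases pvFindFromNat v.reverse b.reverse hrb (v.length - e) with ⟨g1, _⟩ | ⟨j, gval, gk, gocc, _⟩
    · exact g1
    · exfalso
      have hjb : j + b.length ≤ v.length := by
        have := pvOccLt v.reverse b.reverse hrb j gocc
        simpa [hn] using this
      set i := v.length - (j + b.length) with hidef
      have hib : i + b.length ≤ v.length := by omega
      have : b <+: v.drop i := by
        rw [pvOccRev v b i hib]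
        rw [(by omega : v.length - (i + b.length) = j)]
        exact gocc
      exact h2 i (by omega) this
  · right
    have hib : i + b.length ≤ v.length := by omega
    have goccA : b.reverse <+: v.reverse.drop (v.length - (i + b.length)) :=
      (pvOccRev v b i hib).mp hocc
    refine ⟨i, hle, hocc, hval, ?_⟩
    rcases pvFindFromNat v.reverse b.reverse hrb (v.length - e) with ⟨g1, g2⟩ | ⟨j, gval, gk, gocc, gmin⟩
    · exfalso
      exact g2 (v.length - (i + b.length)) (by omega) goccA
    · rw [gval]
      congr 1
      have hjb : j + b.length ≤ v.length := by
        have := pvOccLt v.reverse b.reverse hrb j gocc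
        simpa [hn] using this
      -- j ≤ v.length - (i + b.length) by minimality of j among occurrences ≥ k
      have hj_le : j ≤ v.length - (i + b.length) := by
        by_contra hgt
        exact gmin (v.length - (i + b.length)) (by omega) (by omega) goccA
      -- and ≥ : otherwise i' := v.length - j - b.length > i would be an occurrence with i' + L ≤ e
      have hj_ge : v.length - (i + b.length) ≤ j := by
        by_contra hlt
        rw [not_le] at hlt
        set i' := v.length - (j + b.length) with hi'def
        have hi'b : i' + b.length ≤ v.length := by omega
        have hocc' : b <+: v.drop i' := by
          rw [pvOccRev v b i' hi'b, (by omega : v.length - (i' + b.length) = j)]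
          exact gocc
        exact hmax i' (by omega) (by omega) hocc'
      omega

theorem pvLoopA_le (v b : List Char) (hb : b ≠ []) (res : List (List Char)) (e : Nat) (m : Int) :
    (rsplitLoopA v b hb res e m).2 ≤ e := by
  induction e using Nat.strong_induction_on generalizing res m with
  | _ e ih =>
    rw [rsplitLoopA]
    by_cases hm : m = 0
    · simp [hm]
    · simp only [hm, if_false]
      by_cases hneg : PySem.Chars.rfindFrom v b 0 (some (e : Int)) < 0
      · simp [hneg]
      · simp only [hneg, dite_false]
        have hlt := pvRfindFrom_toNat_lt v b hb e hneg
        exact le_of_lt (lt_of_le_of_lt (ih _ hlt _ _) hlt)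

theorem pvLoopEq (v b : List Char) (hb : b ≠ []) (hrb : b.reverse ≠ []) (e : Nat)
    (he : e ≤ v.length) (m : Int) (res : List (List Char)) :
    rsplitLoopB v.reverse b.reverse hrb (res.map List.reverse) (v.length - e) m
      = ((rsplitLoopA v b hb res e m).1.map List.reverse,
         v.length - (rsplitLoopA v b hb res e m).2) := by
  induction e using Nat.strong_induction_on generalizing res m with
  | _ e ih =>
    rw [rsplitLoopA, rsplitLoopB]
    by_cases hm : m = 0
    · simp [hm]
    · simp only [hm, if_false]
      rcases pvBridge v b hb e he with ⟨hA, hB⟩ | ⟨i, hle, hocc, hA, hB⟩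
      · have hAneg : PySem.Chars.rfindFrom v b 0 (some (e : Int)) < 0 := by rw [hA]; decide
        have hBneg : PySem.Chars.findFrom v.reverse b.reverse ((v.length - e : Nat) : Int) none < 0 := by
          rw [hB]; decide
        simp [hAneg, hBneg]
      · have hL : 0 < b.length := List.length_pos_of_ne_nil hb
        have hAneg : ¬ PySem.Chars.rfindFrom v b 0 (some (e : Int)) < 0 := by
          rw [hA]; omega
        have hBneg : ¬ PySem.Chars.findFrom v.reverse b.reverse ((v.length - e : Nat) : Int) none < 0 := by
          rw [hB]; omega
        simp only [hAneg, hBneg, dite_false]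
        rw [hA, hB]
        have hslice : PySem.Chars.slice v.reverse (some ((v.length - e : Nat) : Int))
              (some ((v.length - (i + b.length) : Nat) : Int))
            = (PySem.Chars.slice v (some ((i : Int) + (b.length : Int))) (some (e : Int))).reverse := by
          rw [(by push_cast; ring : (i : Int) + (b.length : Int) = ((i + b.length : Nat) : Int))]
          simp only [PySem.Chars.slice_eq_listSlice, PySem.List.slice_natCast]
          rw [List.drop_reverse, (by omega : v.length - (v.length - e) = e),
            (by omega : v.length - (i + b.length) - (v.length - e) = e - (i + b.length)),
            List.take_reverse,
            (by simp; omega : (v.take e).length - (e - (i + b.length)) = i + b.length),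
            List.drop_take]
        have hstart : ((v.length - (i + b.length) : Nat) : Int).toNat + b.reverse.length
            = v.length - i := by
          simp [List.length_reverse]
          omega
        have hres : (res.map List.reverse) ++
              [PySem.Chars.slice v.reverse (some ((v.length - e : Nat) : Int))
                (some ((v.length - (i + b.length) : Nat) : Int))]
            = (res ++ [PySem.Chars.slice v (some ((i : Int) + (b.length : Int))) (some (e : Int))]).map List.reverse := by
          rw [hslice]
          simp
        rw [hres, hstart, (by simp : ((i : Int)).toNat = i),
          (by omega : v.length - i = v.length - i)]
        have := ih i (by omega) (by omega) (m - 1)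
          (res ++ [PySem.Chars.slice v (some ((i : Int) + (b.length : Int))) (some (e : Int))])
        exact this

-- ===== VERDICT (by name: the statement is the Claim_ definition above) =====
theorem rsplit_spec : Claim_equal_rsplit := by
  intro value by_ maxsplit _ hpre
  unfold Spec_rsplit rsplit rsplit_alt
  have hb : by_.toList ≠ [] := fun h => hpre (String.toList_eq_nil_iff.mp h)
  have hb0 : ¬ (by_.toList.length = 0) := by simpa using hb
  simp only [hb0, dite_false]
  have hrb : by_.toList.reverse ≠ [] :=
    fun hn => hb (by simpa using congrArg List.reverse hn)
  have key := pvLoopEq value.toList by_.toList hb hrb value.toList.length le_rfl maxsplit []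
  rw [Nat.sub_self, List.map_nil] at key
  have hAle := pvLoopA_le value.toList by_.toList hb [] value.toList.length maxsplit
  show List.map String.ofList
      ((rsplitLoopA value.toList by_.toList hb [] value.toList.length maxsplit).1 ++
        [PySem.Chars.slice value.toList none
          (some ((rsplitLoopA value.toList by_.toList hb [] value.toList.length maxsplit).2 : Int))]).reverse =
    List.map (fun p => String.ofList p.reverse)
      ((rsplitLoopB value.toList.reverse by_.toList.reverse hrb [] 0 maxsplit).1 ++
        [PySem.Chars.slice value.toList.reverse
          (some ((rsplitLoopB value.toList.reverse by_.toList.reverse hrb [] 0 maxsplit).2 : Int))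
          none]).reverse
  rw [key]
  simp only [PySem.Chars.slice_eq_listSlice, PySem.List.slice_to_natCast,
    PySem.List.slice_from_natCast]
  rw [List.drop_reverse,
    (by omega : value.toList.length - (value.toList.length -
      (rsplitLoopA value.toList by_.toList hb [] value.toList.length maxsplit).2)
        = (rsplitLoopA value.toList by_.toList hb [] value.toList.length maxsplit).2)]
  simp [List.map_reverse, List.map_map, Function.comp]
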